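-- pv_equiv track=rewrite | github.com/leesunyong/BaekJoon | 1~10000/5525/solution.py | solution
-- ===== SOURCE A (Python) =====
-- def solution(N, M, S):
--     cnt = 0
--     current = 'I'
--     length = 0
--     for c in S:
--         if c == 'I' :
--             if current == 'I':
--                 length += 1
--                 if length >= N * 2 + 1:
--                     cnt += 1
--             else :
--                 length = 1
--             current = 'O'
--         else :
--             if current == 'O':
--                 current = 'I'
--                 length += 1
--             else :
--                 length = 0
--
--
--     return cnt
-- ===== SOURCE B (Python) =====
-- def solution(N, M, S):
--     # direct windowed pattern count: a match at i is I at even offsets, non-I at odd offsets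
--     L = 2 * N + 1
--     cnt = 0
--     for i in range(len(S) - L + 1):
--         if all((S[i + j] == 'I') == (j % 2 == 0) for j in range(L)):
--             cnt += 1
--     return cnt
-- ===== Notes on version B (the rewrite author's own statement) =====
-- stated objective: simpler
-- what changed: Replaces A's per-character alternation automaton (running length + expected-char state) by a direct sliding-window count: for each start index, test whether the 2N+1-long window has 'I' exactly at even offsets.
-- outside the precondition, e.g. on solution(0, 0, 'II'): A returns 1, B returns 2; on solution(-1, 0, 'I'): A returns 1, B returns 3
import Mathlib
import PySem

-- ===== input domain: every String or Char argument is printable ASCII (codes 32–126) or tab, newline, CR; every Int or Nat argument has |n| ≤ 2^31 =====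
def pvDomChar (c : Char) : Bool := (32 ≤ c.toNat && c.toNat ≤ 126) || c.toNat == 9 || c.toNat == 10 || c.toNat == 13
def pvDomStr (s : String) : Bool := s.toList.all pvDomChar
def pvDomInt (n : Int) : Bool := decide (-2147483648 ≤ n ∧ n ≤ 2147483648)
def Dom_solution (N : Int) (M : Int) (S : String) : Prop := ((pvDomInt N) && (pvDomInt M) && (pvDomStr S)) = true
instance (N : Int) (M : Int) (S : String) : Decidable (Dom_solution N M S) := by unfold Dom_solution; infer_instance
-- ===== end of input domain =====

-- B replaces A's per-character alternation automaton by a direct sliding-window pattern count (same values on N ≥ 1; not faster).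

-- ===== PORT A =====
-- one step of A's for-loop: state is (cnt, current, length)
def solutionStepA (N : Int) (st : Int × Char × Int) (c : Char) : Int × Char × Int :=
  if c = 'I' then
    if st.2.1 = 'I' then
      (if N * 2 + 1 ≤ st.2.2 + 1 then st.1 + 1 else st.1, 'O', st.2.2 + 1)
    else
      (st.1, 'O', 1)
  else
    if st.2.1 = 'O' then
      (st.1, 'I', st.2.2 + 1)
    else
      (st.1, st.2.1, 0)

def solution (N : Int) (M : Int) (S : String) : Int :=
  (S.toList.foldl (solutionStepA N) (0, 'I', 0)).1

-- ===== PORT B =====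
-- Python B's window test: all((S[i+j]=='I') == (j%2==0) for j in range(L))
def solutionAltMatch (cs : List Char) (L : Int) (i : Int) : Bool :=
  (PySem.List.pyRange 0 L 1).all
    (fun j => ((PySem.List.pyGetD cs (i + j) ' ') == 'I') == (decide (PySem.Int.mod j 2 = 0)))

def solution_alt (N : Int) (M : Int) (S : String) : Int :=
  (PySem.List.pyRange 0 ((S.toList.length : Int) - (2 * N + 1) + 1) 1).foldl
    (fun cnt i => if solutionAltMatch S.toList (2 * N + 1) i then cnt + 1 else cnt) 0

-- ===== PRECONDITION & SPEC =====
-- Pre_ restricts to the problem's natural domain N ≥ 1: for N ≤ 0 (a nonsensical pattern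
-- length) A's returned counts are artefacts of its automaton (it counts only every other
-- 'I' in a block of 'I's), which B's windowed count has no reason to mimic.
def Pre_solution (N : Int) (M : Int) (S : String) : Prop := 1 ≤ N
instance (N : Int) (M : Int) (S : String) : Decidable (Pre_solution N M S) := by
  unfold Pre_solution; infer_instance

def pvWitness_solution : Int × Int × String := (1, 6, "OIOIOII")

def Spec_solution (N : Int) (M : Int) (S : String) (out : Int) : Prop := out = solution_alt N M S
instance (N : Int) (M : Int) (S : String) (out : Int) : Decidable (Spec_solution N M S out) := by
  unfold Spec_solution; infer_instance

-- ===== CLAIM (what is proved, stated in full; the proofs are below) =====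
def Claim_equal_solution : Prop := ∀ (N : Int) (M : Int) (S : String), Dom_solution N M S → Pre_solution N M S → Spec_solution N M S (solution N M S)

-- ===== LEMMAS AND PROOFS =====

-- model of A's state: the pair (current, length) collapses to a single Nat f
-- (current = 'I' iff f is even), and cnt is counted separately
def mstep (f : Nat) (c : Char) : Nat :=
  if c = 'I' then (if f % 2 = 0 then f + 1 else 1)
  else (if f % 2 = 1 then f + 1 else 0)

def mfold (f : Nat) (cs : List Char) : Nat := cs.foldl mstep f

def mcount (n f : Nat) : List Char → Nat
  | [] => 0
  | c :: cs => (if c = 'I' ∧ f % 2 = 0 ∧ 2 * n ≤ f then 1 else 0) + mcount n (mstep f c) cs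

-- the window starting at i matches I(OI)^n  (any non-'I' plays the 'O' role)
abbrev wmatch (n : Nat) (cs : List Char) (i : Nat) : Prop :=
  ∀ m < 2 * n + 1, (cs.getD (i + m) ' ' = 'I' ↔ m % 2 = 0)

def wcount (n : Nat) (cs : List Char) : Nat :=
  (List.range (cs.length + 1 - (2 * n + 1))).countP (fun i => decide (wmatch n cs i))

-- t is the length of an alternating suffix of cs starting with 'I'
def validAlt (cs : List Char) (t : Nat) : Prop :=
  t ≤ cs.length ∧ ∀ m < t, (cs.getD (cs.length - t + m) ' ' = 'I' ↔ m % 2 = 0)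

theorem validAlt_parity {cs : List Char} {t1 t2 : Nat} (h1 : validAlt cs t1)
    (h2 : validAlt cs t2) (p1 : 1 ≤ t1) (p2 : 1 ≤ t2) : t1 % 2 = t2 % 2 := by
  obtain ⟨l1, v1⟩ := h1
  obtain ⟨l2, v2⟩ := h2
  have e1 := v1 (t1 - 1) (by omega)
  have e2 := v2 (t2 - 1) (by omega)
  have i1 : cs.length - t1 + (t1 - 1) = cs.length - 1 := by omega
  have i2 : cs.length - t2 + (t2 - 1) = cs.length - 1 := by omega
  rw [i1] at e1; rw [i2] at e2
  by_cases h : cs.getD (cs.length - 1) ' ' = 'I'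
  · have := e1.mp h; have := e2.mp h; omega
  · have : ¬ (t1 - 1) % 2 = 0 := fun hh => h (e1.mpr hh)
    have : ¬ (t2 - 1) % 2 = 0 := fun hh => h (e2.mpr hh)
    omega

theorem validAlt_shrink {cs : List Char} {t k : Nat} (h : validAlt cs t) (hk : k ≤ t)
    (hp : (t - k) % 2 = 0) : validAlt cs k := by
  obtain ⟨l, v⟩ := h
  refine ⟨by omega, fun m hm => ?_⟩
  have := v (t - k + m) (by omega)
  have idx : cs.length - t + (t - k + m) = cs.length - k + m := by omega
  rw [idx] at this
  rw [this]
  omega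

theorem getD_append_lt (cs : List Char) (c : Char) {i : Nat} (h : i < cs.length) :
    (cs ++ [c]).getD i ' ' = cs.getD i ' ' := by
  simp [List.getD_eq_getElem?_getD, List.getElem?_append_left h]

theorem getD_append_len (cs : List Char) (c : Char) :
    (cs ++ [c]).getD cs.length ' ' = c := by
  simp [List.getD_eq_getElem?_getD, List.getElem?_append_right (Nat.le_refl _)]

theorem mfold_append (f : Nat) (cs : List Char) (c : Char) :
    mfold f (cs ++ [c]) = mstep (mfold f cs) c := by
  simp [mfold]

theorem mcount_append (n : Nat) : ∀ (cs : List Char) (f : Nat) (c : Char),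
    mcount n f (cs ++ [c]) =
      mcount n f cs + (if c = 'I' ∧ (mfold f cs) % 2 = 0 ∧ 2 * n ≤ mfold f cs then 1 else 0) := by
  intro cs
  induction cs with
  | nil => intro f c; simp [mcount, mfold]
  | cons d cs ih =>
      intro f c
      simp only [List.cons_append, mcount, ih (mstep f d) c, mfold, List.foldl_cons]
      ac_rfl

-- the valid-suffix invariant of the automaton, plus the count equality
theorem main_inv (n : Nat) (hn : 1 ≤ n) : ∀ cs : List Char,
    (mcount n 0 cs = wcount n cs) ∧ validAlt cs (mfold 0 cs) ∧
      (∀ t, validAlt cs t → t ≤ mfold 0 cs) := by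
  intro cs
  induction cs using List.reverseRecOn with
  | nil =>
      refine ⟨?_, ⟨by simp [mfold], by simp [mfold]⟩, ?_⟩
      · simp [mcount, wcount]
      · intro t ht; simpa [mfold] using ht.1
  | append_singleton cs c ih =>
      obtain ⟨ihc, ihv, ihm⟩ := ih
      set F := mfold 0 cs with hF
      set len := cs.length with hlen
      have hFlen : F ≤ len := ihv.1
      have hlen' : (cs ++ [c]).length = len + 1 := by simp [hlen]
      -- validAlt for the extended list, by cases
      have hvalid : validAlt (cs ++ [c]) (mstep F c) := by
        by_cases hc : c = 'I' <;> by_cases hf : F % 2 = 0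
        · -- c = 'I', F even → F + 1
          rw [show mstep F c = F + 1 by simp [mstep, hc, hf]]
          refine ⟨by omega, fun m hm => ?_⟩
          rcases Nat.lt_or_ge m F with hmF | hmF
          · have idx : (cs ++ [c]).length - (F + 1) + m = len - F + m := by
              rw [hlen']; omega
            rw [idx, getD_append_lt cs c (by omega)]
            exact ihv.2 m hmF
          · have hmF' : m = F := by omega
            have idx : (cs ++ [c]).length - (F + 1) + m = len := by rw [hlen']; omega
            rw [idx, getD_append_len, hmF']
            simp [hc, hf]
        · -- c = 'I', F odd → 1
          rw [show mstep F c = 1 by simp [mstep, hc, hf]]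
          refine ⟨by rw [hlen']; omega, fun m hm => ?_⟩
          have hm0 : m = 0 := by omega
          have idx : (cs ++ [c]).length - 1 + m = len := by rw [hlen']; omega
          rw [idx, getD_append_len, hm0]
          simp [hc]
        · -- c ≠ 'I', F even → 0
          rw [show mstep F c = 0 by simp [mstep, hc, hf]]
          exact ⟨by omega, fun m hm => by omega⟩
        · -- c ≠ 'I', F odd → F + 1
          rw [show mstep F c = F + 1 by simp [mstep, hc, hf, Nat.mod_two_ne_zero.mp hf]]
          refine ⟨by omega, fun m hm => ?_⟩
          rcases Nat.lt_or_ge m F with hmF | hmF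
          · have idx : (cs ++ [c]).length - (F + 1) + m = len - F + m := by
              rw [hlen']; omega
            rw [idx, getD_append_lt cs c (by omega)]
            exact ihv.2 m hmF
          · have hmF' : m = F := by omega
            have idx : (cs ++ [c]).length - (F + 1) + m = len := by rw [hlen']; omega
            rw [idx, getD_append_len, hmF']
            simp [hc]
            omega
      -- a valid t for cs ++ [c] with t ≥ 2 yields valid (t-1) for cs, and pins c
      have hpeel : ∀ t, validAlt (cs ++ [c]) t → 1 ≤ t →
          ((c = 'I' ↔ (t - 1) % 2 = 0) ∧ (2 ≤ t → validAlt cs (t - 1))) := by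
        intro t ⟨hl, hv⟩ ht1
        rw [hlen'] at hl
        constructor
        · have := hv (t - 1) (by omega)
          have idx : (cs ++ [c]).length - t + (t - 1) = len := by rw [hlen']; omega
          rw [idx, getD_append_len] at this
          exact this
        · intro ht2
          refine ⟨by omega, fun m hm => ?_⟩
          have := hv m (by omega)
          have idx : (cs ++ [c]).length - t + m = len - (t - 1) + m := by
            rw [hlen']; omega
          rw [idx, getD_append_lt cs c (by omega)] at this
          exact this
      have hmax : ∀ t, validAlt (cs ++ [c]) t → t ≤ mstep F c := by
        intro t ht
        rcases Nat.eq_zero_or_pos t with ht0 | ht1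
        · omega
        obtain ⟨hlast, hpre⟩ := hpeel t ht ht1
        by_cases hc : c = 'I' <;> by_cases hf : F % 2 = 0
        · -- c='I', F even: t ≤ F + 1
          rw [show mstep F c = F + 1 by simp [mstep, hc, hf]]
          rcases Nat.lt_or_ge t 2 with h2 | h2
          · omega
          · have := ihm (t - 1) (hpre h2); omega
        · -- c='I', F odd: t ≤ 1
          rw [show mstep F c = 1 by simp [mstep, hc, hf]]
          by_contra hcon
          have h2 : 2 ≤ t := by omega
          have hodd : t % 2 = 1 := by
            have := hlast.mpr; simp [hc] at hlast; omega
          have h3 : 3 ≤ t := by omega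
          have hv1 := hpre h2
          have hle := ihm (t - 1) hv1
          have hpar := validAlt_parity ihv hv1 (by omega) (by omega)
          omega
        · -- c≠'I', F even: t = 0 impossible
          rw [show mstep F c = 0 by simp [mstep, hc, hf]]
          by_contra hcon
          have hodd : t % 2 = 0 := by
            have : ¬ (t - 1) % 2 = 0 := fun hh => hc (hlast.mpr hh)
            omega
          have h2 : 2 ≤ t := by omega
          have hv1 := hpre h2
          have hle := ihm (t - 1) hv1
          have hF1 : 1 ≤ F := by omega
          have hpar := validAlt_parity ihv hv1 (by omega) (by omega)
          omega
        · -- c≠'I', F odd: t ≤ F + 1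
          rw [show mstep F c = F + 1 by simp [mstep, hc, hf, Nat.mod_two_ne_zero.mp hf]]
          have hodd : t % 2 = 0 := by
            have : ¬ (t - 1) % 2 = 0 := fun hh => hc (hlast.mpr hh)
            omega
          have h2 : 2 ≤ t := by omega
          have := ihm (t - 1) (hpre h2); omega
      refine ⟨?_, by rw [mfold_append]; exact hvalid, by rw [mfold_append]; exact hmax⟩
      -- the count equality
      rw [mcount_append n cs 0 c, ← hF]
      have hwc : wcount n (cs ++ [c]) =
          wcount n cs + (if len + 1 ≥ 2 * n + 1 ∧ wmatch n (cs ++ [c]) (len - 2 * n) then 1 else 0) := by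
        unfold wcount
        rw [hlen', ← hlen]
        rcases Nat.lt_or_ge (len + 1) (2 * n + 1) with hlt | hge
        · have e1 : len + 1 + 1 - (2 * n + 1) = 0 := by omega
          have e2 : len + 1 - (2 * n + 1) = 0 := by omega
          have hcond : ¬ (len + 1 ≥ 2 * n + 1 ∧ wmatch n (cs ++ [c]) (len - 2 * n)) := by
            rintro ⟨h1, _⟩; omega
          rw [e1, e2, if_neg hcond]
          simp
        · have e1 : len + 1 + 1 - (2 * n + 1) = (len + 1 - (2 * n + 1)) + 1 := by omega
          rw [e1, List.range_succ, List.countP_append]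
          have e3 : len + 1 - (2 * n + 1) = len - 2 * n := by omega
          have hsame : (List.range (len + 1 - (2 * n + 1))).countP (fun i => decide (wmatch n (cs ++ [c]) i)) =
              (List.range (len + 1 - (2 * n + 1))).countP (fun i => decide (wmatch n cs i)) := by
            apply List.countP_congr
            intro i hi
            rw [List.mem_range] at hi
            have hiff : wmatch n (cs ++ [c]) i ↔ wmatch n cs i := by
              unfold wmatch
              constructor <;> intro h m hm <;> have hh := h m hm
              · rwa [getD_append_lt cs c (by omega)] at hh
              · rwa [getD_append_lt cs c (by omega)]
            simp [hiff]
          rw [hsame, e3]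
          by_cases hw : wmatch n (cs ++ [c]) (len - 2 * n)
          · simp [hw, hge]
          · simp [hw]
      rw [hwc, ihc]
      congr 1
      -- the two indicators agree
      have hiff : (c = 'I' ∧ F % 2 = 0 ∧ 2 * n ≤ F) ↔
          (len + 1 ≥ 2 * n + 1 ∧ wmatch n (cs ++ [c]) (len - 2 * n)) := by
        constructor
        · rintro ⟨hc, hf, hle⟩
          have hlen2 : 2 * n ≤ len := by omega
          refine ⟨by omega, fun m hm => ?_⟩
          rcases Nat.lt_or_ge m (2 * n) with hm2 | hm2
          · have hv2n : validAlt cs (2 * n) := validAlt_shrink ihv hle (by omega)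
            have := hv2n.2 m hm2
            rw [getD_append_lt cs c (by omega)]
            have idx : len - 2 * n + m = len - 2 * n + m := rfl
            exact this
          · have hm' : m = 2 * n := by omega
            have idx : len - 2 * n + m = len := by omega
            rw [idx, getD_append_len, hm']
            simp [hc]
        · rintro ⟨hge, hw⟩
          have hc : c = 'I' := by
            have := hw (2 * n) (by omega)
            have idx : len - 2 * n + 2 * n = len := by omega
            rw [idx, getD_append_len] at this
            simpa using this.mpr (by omega)
          have hv2n : validAlt cs (2 * n) := by
            refine ⟨by omega, fun m hm => ?_⟩
            have := hw m (by omega)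
            rwa [getD_append_lt cs c (by omega)] at this
          have hle : 2 * n ≤ F := ihm (2 * n) hv2n
          have hf : F % 2 = 0 := by
            have := validAlt_parity ihv hv2n (by omega) (by omega)
            omega
          exact ⟨hc, hf, hle⟩
      by_cases h : c = 'I' ∧ F % 2 = 0 ∧ 2 * n ≤ F
      · rw [if_pos h, if_pos (hiff.mp h)]
      · rw [if_neg h, if_neg (fun hh => h (hiff.mpr hh))]

-- A's fold equals the model count
theorem foldA_eq (N : Int) (hN : 1 ≤ N) : ∀ (cs : List Char) (cnt : Int) (f : Nat),
    (cs.foldl (solutionStepA N) (cnt, (if f % 2 = 0 then 'I' else 'O'), (f : Int))).1 =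
      cnt + (mcount N.toNat f cs : Int) := by
  intro cs
  induction cs with
  | nil => intro cnt f; simp [mcount]
  | cons c cs ih =>
      intro cnt f
      simp only [List.foldl_cons, mcount]
      by_cases hc : c = 'I' <;> by_cases hf : f % 2 = 0
      · -- c = 'I', f even: count branch
        have hstep : solutionStepA N (cnt, if f % 2 = 0 then 'I' else 'O', (f : Int)) c =
            ((if N * 2 + 1 ≤ (f : Int) + 1 then cnt + 1 else cnt), 'O', (f : Int) + 1) := by
          simp [solutionStepA, hc, hf]
        have hm : mstep f c = f + 1 := by simp [mstep, hc, hf]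
        have h1 : ¬ (f + 1) % 2 = 0 := by omega
        have hih := ih (if N * 2 + 1 ≤ (f : Int) + 1 then cnt + 1 else cnt) (f + 1)
        rw [if_neg h1] at hih
        push_cast at hih
        rw [hstep, hih, hm]
        by_cases hth : 2 * N.toNat ≤ f
        · rw [if_pos (show N * 2 + 1 ≤ (f : Int) + 1 by omega),
              if_pos (⟨hc, hf, hth⟩ : c = 'I' ∧ f % 2 = 0 ∧ 2 * N.toNat ≤ f)]
          push_cast; ring
        · rw [if_neg (show ¬ N * 2 + 1 ≤ (f : Int) + 1 by omega),
              if_neg (fun h => hth h.2.2)]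
          push_cast; ring
      · -- c = 'I', f odd
        have hstep : solutionStepA N (cnt, if f % 2 = 0 then 'I' else 'O', (f : Int)) c =
            (cnt, 'O', (1 : Int)) := by
          simp [solutionStepA, hc, hf]
        have hm : mstep f c = 1 := by simp [mstep, hc, hf]
        have hih := ih cnt 1
        rw [if_neg (show ¬ (1 : Nat) % 2 = 0 by omega)] at hih
        push_cast at hih
        rw [hstep, hih, hm, if_neg (fun h => hf h.2.1)]
        push_cast; ring
      · -- c ≠ 'I', f even
        have hstep : solutionStepA N (cnt, if f % 2 = 0 then 'I' else 'O', (f : Int)) c =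
            (cnt, 'I', (0 : Int)) := by
          simp [solutionStepA, hc, hf]
        have hm : mstep f c = 0 := by simp [mstep, hc, hf]
        have hih := ih cnt 0
        rw [if_pos (show (0 : Nat) % 2 = 0 by norm_num)] at hih
        push_cast at hih
        rw [hstep, hih, hm, if_neg (fun h => hc h.1)]
        push_cast; ring
      · -- c ≠ 'I', f odd
        have hstep : solutionStepA N (cnt, if f % 2 = 0 then 'I' else 'O', (f : Int)) c =
            (cnt, 'I', (f : Int) + 1) := by
          simp [solutionStepA, hc, hf]
        have hm : mstep f c = f + 1 := by
          simp [mstep, hc, hf, Nat.mod_two_ne_zero.mp hf]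
        have h1 : (f + 1) % 2 = 0 := by omega
        have hih := ih cnt (f + 1)
        rw [if_pos h1] at hih
        push_cast at hih
        rw [hstep, hih, hm, if_neg (fun h => hf h.2.1)]
        push_cast; ring

theorem beq_decide_iff (x : Char) (P : Prop) [Decidable P] :
    (((x == 'I') == decide P) = true) ↔ (x = 'I' ↔ P) := by
  by_cases hP : P <;> by_cases hx : x = 'I' <;> simp [hP, hx]

theorem match_eq (n : Nat) (cs : List Char) (k : Nat) :
    solutionAltMatch cs ((2 * n + 1 : Nat) : Int) ((k : Nat) : Int) = decide (wmatch n cs k) := by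
  rw [Bool.eq_iff_iff, decide_eq_true_iff]
  unfold solutionAltMatch wmatch
  rw [List.all_eq_true]
  constructor
  · intro h m hm
    have hmem : ((m : Nat) : Int) ∈ PySem.List.pyRange 0 ((2 * n + 1 : Nat) : Int) 1 := by
      rw [PySem.List.mem_pyRange_one]
      exact ⟨by positivity, by exact_mod_cast hm⟩
    have hb := h _ hmem
    simp only [← Nat.cast_add, PySem.List.pyGetD_natCast] at hb
    rw [beq_decide_iff] at hb
    rw [PySem.Int.mod_eq_emod_of_pos (by norm_num)] at hb
    rw [hb]
    omega
  · intro h j hj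
    rw [PySem.List.mem_pyRange_one] at hj
    have hj' : j = ((j.toNat : Nat) : Int) := by omega
    have hb := h j.toNat (by omega)
    rw [hj']
    simp only [← Nat.cast_add, PySem.List.pyGetD_natCast]
    rw [beq_decide_iff]
    rw [PySem.Int.mod_eq_emod_of_pos (by norm_num)]
    rw [hb]
    omega

-- B's fold equals the window count
theorem foldB_eq (N : Int) (hN : 1 ≤ N) (S : String) :
    solution_alt N 0 S = (wcount N.toNat S.toList : Int) := by
  unfold solution_alt
  have hNn : N = (N.toNat : Int) := by omega
  rw [hNn]
  set n := N.toNat with hn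
  set cs := S.toList with hcs
  have hL : 2 * ((n : Nat) : Int) + 1 = ((2 * n + 1 : Nat) : Int) := by push_cast; ring
  rw [hL]
  rcases Nat.lt_or_ge cs.length (2 * n + 1) with hsmall | hbig
  · have hK : ((cs.length : Int) - ((2 * n + 1 : Nat) : Int) + 1) ≤ 0 := by omega
    rw [PySem.List.pyRange_one_eq_nil hK]
    have h0 : cs.length + 1 - (2 * n + 1) = 0 := by omega
    simp [wcount, h0]
  · have hK : ((cs.length : Int) - ((2 * n + 1 : Nat) : Int) + 1) =
        ((cs.length + 1 - (2 * n + 1) : Nat) : Int) := by omega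
    rw [hK, PySem.List.pyRange_zero_natCast, List.foldl_map]
    simp only [match_eq]
    rw [PySem.List.foldl_if_add_one]
    simp only [wcount, Int.zero_add]
    rfl

theorem solution_alt_M (N M M' : Int) (S : String) : solution_alt N M S = solution_alt N M' S := by
  rfl

-- ===== VERDICT (by name: the statement is the Claim_ definition above) =====
theorem solution_spec : Claim_equal_solution := by
  intro N M S _ hpre
  unfold Spec_solution Pre_solution at *
  have hN : 1 ≤ N := hpre
  have hA : solution N M S = (mcount N.toNat 0 S.toList : Int) := by
    unfold solution
    have := foldA_eq N hN S.toList 0 0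
    norm_num at this
    simpa using this
  have hB : solution_alt N M S = (wcount N.toNat S.toList : Int) := by
    rw [solution_alt_M N M 0, foldB_eq N hN S]
  rw [hA, hB]
  have hn : 1 ≤ N.toNat := by omega
  exact_mod_cast (main_inv N.toNat hn S.toList).1
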